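-- pv_equiv track=rewrite | github.com/reisenx/2110101-COM-PROG | P3 Grader 03 Practice/P3_​04_​Ascii.py | check_right_column
-- ===== SOURCE A (Python) =====
-- def check_column(textlist, column):
--     AllDot = True
--     nrows = len(textlist)
--     # Check if every row are all dot ('.')
--     for row in range(nrows):
--         if(textlist[row][column] != '.'):
--             AllDot = False
--             break
--     # Returns a result
--     return AllDot
--
-- def check_right_column(textlist):
--     ncols = len(textlist[0])
--     # Loop every column in 'textlist' and put left column that need to be stripped in a list
--     # Need to start at the last column first, then decrease the column by 1 each loop
--     right_cols = []
--     for col in range(ncols-1, -1, -1):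
--         if(check_column(textlist,col)):
--             right_cols.append(col)
--         # Break the loop if the right column ended
--         else:
--             break
--     # Returns a list of column
--     return right_cols
-- ===== SOURCE B (Python) =====
-- # B: one pass over rows (rightmost non-dot index per row, running max) then a single range; A scans column-by-column with a nested all-dot check.
-- def _rightmost_non_dot(row, ncols):
--     for j in range(min(len(row), ncols) - 1, -1, -1):
--         if row[j] != '.':
--             return j
--     return -1
--
-- def check_right_column(textlist):
--     ncols = len(textlist[0])
--     m = -1
--     for row in textlist:
--         m = max(m, _rightmost_non_dot(row, ncols))
--     return list(range(ncols - 1, m, -1))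
-- ===== Notes on version B (the rewrite author's own statement) =====
-- stated objective: alternative
-- what changed: Replaces A's column-by-column scan (each column checked against every row, appending until the first non-all-dot column) by one row-major pass that keeps the running maximum of each row's rightmost non-dot index and emits the answer as a single range.
import Mathlib
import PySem

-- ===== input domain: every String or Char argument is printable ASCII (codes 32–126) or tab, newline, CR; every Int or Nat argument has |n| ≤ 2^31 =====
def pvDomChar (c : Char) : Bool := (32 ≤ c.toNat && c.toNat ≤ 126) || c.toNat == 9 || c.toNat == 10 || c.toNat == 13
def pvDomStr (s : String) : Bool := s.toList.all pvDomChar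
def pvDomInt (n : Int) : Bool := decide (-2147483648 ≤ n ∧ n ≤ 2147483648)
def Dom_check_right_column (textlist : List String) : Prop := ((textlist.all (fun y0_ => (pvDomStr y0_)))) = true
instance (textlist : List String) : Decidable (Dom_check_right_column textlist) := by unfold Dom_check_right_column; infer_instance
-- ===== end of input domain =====

-- B replaces A's column-by-column all-dot scan with one row-major pass (running max of each row's rightmost non-dot index) plus a single range; same cost, different traversal.

-- ===== PORT A =====
-- check_column: for row in range(nrows): if textlist[row][column] != '.': return False; sequential
-- indexing of textlist[row] is the structural recursion on the list.
def check_column_A : List String → Int → Bool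
  | [], _ => true
  | s :: rest, col =>
    match PySem.Str.pyGet? s col with
    | none => true               -- Python raises IndexError here; excluded by Pre_
    | some c => if c ≠ '.' then false else check_column_A rest col

-- the 'for col in range(ncols-1,-1,-1): append / break' loop
def goA (textlist : List String) : List Int → List Int → List Int
  | [], acc => acc
  | c :: cs, acc => if check_column_A textlist c then goA textlist cs (acc ++ [c]) else acc

def check_right_column (textlist : List String) : List Int :=
  match PySem.List.pyGet? textlist 0 with
  | none => []                   -- Python raises IndexError (empty textlist); excluded by Pre_
  | some s0 =>
    let ncols : Int := PySem.Str.len s0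
    goA textlist (PySem.List.pyRange (ncols - 1) (-1) (-1)) []

-- ===== PORT B =====
-- for j in range(min(len(row), ncols)-1, -1, -1): if row[j] != '.': return j; else -1
def rmAux (cs : List Char) : List Int → Int
  | [] => -1
  | j :: js =>
    match PySem.List.pyGet? cs j with
    | none => -1                 -- unreachable: j is a valid index of cs
    | some c => if c ≠ '.' then j else rmAux cs js

def rightmostNonDot (row : String) (ncols : Int) : Int :=
  rmAux row.toList (PySem.List.pyRange (min (PySem.Str.len row) ncols - 1) (-1) (-1))

def check_right_column_alt (textlist : List String) : List Int :=
  match PySem.List.pyGet? textlist 0 with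
  | none => []                   -- Python raises IndexError (empty textlist); excluded by Pre_
  | some s0 =>
    let ncols : Int := PySem.Str.len s0
    let m : Int := textlist.foldl (fun m row => max m (rightmostNonDot row ncols)) (-1)
    PySem.List.pyRange (ncols - 1) m (-1)

-- ===== PRECONDITION & SPEC =====
-- Pre_ excludes exactly the inputs where A raises IndexError: the empty list, and grids in which some
-- row is shorter than the first row and no earlier (long) row has a non-dot in the last column — there
-- A's scan of the last column reaches the short row and indexes past its end.
def Pre_check_right_column (textlist : List String) : Prop :=
  textlist ≠ [] ∧
  ∀ r < textlist.length,
    ((textlist.getD r "").toList.length : Int) < ((textlist.getD 0 "").toList.length : Int) →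
    ∃ r' < r, ((textlist.getD 0 "").toList.length : Int) ≤ ((textlist.getD r' "").toList.length : Int) ∧
      (textlist.getD r' "").toList.getD ((textlist.getD 0 "").toList.length - 1) '.' ≠ '.'
instance (textlist : List String) : Decidable (Pre_check_right_column textlist) := by
  unfold Pre_check_right_column; infer_instance

def pvWitness_check_right_column : List String := ["ab", "cd"]

def Spec_check_right_column (textlist : List String) (out : List Int) : Prop := out = check_right_column_alt textlist
instance (textlist : List String) (out : List Int) : Decidable (Spec_check_right_column textlist out) := by unfold Spec_check_right_column; infer_instance

-- ===== CLAIM (what is proved, stated in full; the proofs are below) =====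
def Claim_equal_check_right_column : Prop := ∀ (textlist : List String), Dom_check_right_column textlist → Pre_check_right_column textlist → Spec_check_right_column textlist (check_right_column textlist)

-- ===== LEMMAS AND PROOFS =====

theorem goA_eq_takeWhile (tl : List String) (L acc : List Int) :
    goA tl L acc = acc ++ L.takeWhile (check_column_A tl) := by
  induction L generalizing acc with
  | nil => simp [goA]
  | cons c cs ih =>
    simp only [goA, List.takeWhile]
    by_cases h : check_column_A tl c = true
    · simp [h, ih]
    · simp [h]

-- check_column when every row is long enough at column c
theorem checkCol_iff (tl : List String) (c : Int) (h0 : 0 ≤ c)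
    (h : ∀ s ∈ tl, c < (s.toList.length : Int)) :
    check_column_A tl c = true ↔ ∀ s ∈ tl, s.toList.getD c.toNat '.' = '.' := by
  induction tl with
  | nil => simp [check_column_A]
  | cons s rest ih =>
    have hs : c < (s.toList.length : Int) := h s (by simp)
    have hlt : c.toNat < s.toList.length := by omega
    have hget : PySem.List.pyGet? s.toList c = some s.toList[c.toNat] :=
      PySem.List.pyGet?_eq_some_getElem s.toList h0 hs
    have hrest := ih (fun x hx => h x (by simp [hx]))
    have hD : s.toList.getD c.toNat '.' = s.toList[c.toNat] := List.getD_eq_getElem _ _ hlt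
    simp only [check_column_A, PySem.Str.pyGet?_eq, PySem.Chars.pyGet?_eq_listPyGet?, hget,
      List.mem_cons]
    by_cases hc : s.toList[c.toNat] = '.'
    · simp only [hc, ne_eq, not_true_eq_false, if_false]
      rw [hrest]
      constructor
      · rintro hall x (rfl | hx)
        · rw [hD]; exact hc
        · exact hall x hx
      · intro hall x hx; exact hall x (Or.inr hx)
    · simp only [ne_eq, hc, not_false_eq_true, if_true]
      constructor
      · intro h'; exact absurd h' (by simp)
      · intro hall
        have := hall s (Or.inl rfl)
        rw [hD] at this; exact absurd this hc

-- check_column is false when some row has a non-dot at c and all earlier rows are long at c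
theorem checkCol_false (tl : List String) (c : Int) (h0 : 0 ≤ c) :
    ∀ i, (hi : i < tl.length) → c < (tl[i].toList.length : Int) →
    tl[i].toList.getD c.toNat '.' ≠ '.' →
    (∀ j, (hj : j < i) → c < ((tl[j]'(by omega)).toList.length : Int)) →
    check_column_A tl c = false := by
  induction tl with
  | nil => intro i hi; simp at hi
  | cons s rest ih =>
    intro i hi hlong hnd hprev
    cases i with
    | zero =>
      simp only [List.getElem_cons_zero] at hlong hnd
      have hlt : c.toNat < s.toList.length := by omega
      have hget : PySem.List.pyGet? s.toList c = some s.toList[c.toNat] :=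
        PySem.List.pyGet?_eq_some_getElem s.toList h0 hlong
      rw [List.getD_eq_getElem _ _ hlt] at hnd
      simp [check_column_A, hget, hnd]
    | succ i =>
      have hs : c < (s.toList.length : Int) := by
        have := hprev 0 (by omega); simpa using this
      have hget : PySem.List.pyGet? s.toList c = some s.toList[c.toNat] :=
        PySem.List.pyGet?_eq_some_getElem s.toList h0 hs
      simp only [check_column_A, PySem.Str.pyGet?_eq, PySem.Chars.pyGet?_eq_listPyGet?, hget]
      by_cases hc : s.toList[c.toNat] = '.'
      · simp only [hc, ne_eq, not_true_eq_false, if_false]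
        exact ih i (by simpa using hi) (by simpa using hlong) (by simpa using hnd)
          (fun j hj => by have := hprev (j+1) (by omega); simpa using this)
      · simp [hc]

-- spec of the inner right-to-left scan of B (stated for a = (k:Int) - 1 to get Nat induction)
theorem rm_spec (cs : List Char) : ∀ (k : Nat), k ≤ cs.length →
    rmAux cs (PySem.List.pyRange ((k : Int) - 1) (-1) (-1)) ≤ (k : Int) - 1 ∧
    -1 ≤ rmAux cs (PySem.List.pyRange ((k : Int) - 1) (-1) (-1)) ∧
    (0 ≤ rmAux cs (PySem.List.pyRange ((k : Int) - 1) (-1) (-1)) →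
      cs.getD (rmAux cs (PySem.List.pyRange ((k : Int) - 1) (-1) (-1))).toNat '.' ≠ '.') ∧
    (∀ j : Int, rmAux cs (PySem.List.pyRange ((k : Int) - 1) (-1) (-1)) < j → j ≤ (k : Int) - 1 →
      cs.getD j.toNat '.' = '.') := by
  intro k
  induction k with
  | zero =>
    intro _
    rw [PySem.List.pyRange_neg_one_eq_nil (by omega)]
    refine ⟨by simp [rmAux], by simp [rmAux], by simp [rmAux], ?_⟩
    intro j h1 h2; simp [rmAux] at h1; omega
  | succ k ih =>
    intro hk
    have hk' : k ≤ cs.length := by omega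
    have hcons : PySem.List.pyRange (((k + 1 : Nat) : Int) - 1) (-1) (-1)
        = ((k : Nat) : Int) :: PySem.List.pyRange (((k : Nat) : Int) - 1) (-1) (-1) := by
      rw [show (((k + 1 : Nat) : Int) - 1) = ((k : Nat) : Int) by push_cast; ring]
      exact PySem.List.pyRange_neg_one_cons (by omega)
    have hklt : k < cs.length := by omega
    have hget : PySem.List.pyGet? cs ((k : Nat) : Int) = some cs[k] := by
      rw [PySem.List.pyGet?_natCast]
      exact List.getElem?_eq_getElem hklt
    rw [hcons]
    simp only [rmAux, hget]
    by_cases hc : cs[k] = '.'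
    · simp only [hc, ne_eq, not_true_eq_false, if_false]
      obtain ⟨i1, i2, i3, i4⟩ := ih hk'
      refine ⟨by omega, i2, i3, ?_⟩
      intro j h1 h2
      by_cases hj : j = (k : Int)
      · subst hj
        rw [List.getD_eq_getElem _ _ (by omega : (↑(k:Nat) : Int).toNat < cs.length)]
        simpa using hc
      · exact i4 j h1 (by omega)
    · simp only [ne_eq, hc, not_false_eq_true, if_true]
      refine ⟨by omega, by omega, ?_, ?_⟩
      · intro _
        rw [List.getD_eq_getElem _ _ (by simpa using hk : (↑(k:Nat) : Int).toNat < cs.length)]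
        simpa using hc
      · intro j h1 h2; omega

-- takeWhile of a countdown range under a threshold predicate
theorem takeWhile_countdown (P : Int → Bool) : ∀ (k : Nat) (m : Int), -1 ≤ m → m ≤ (k : Int) - 1 →
    (∀ c : Int, m < c → c ≤ (k : Int) - 1 → P c = true) →
    (0 ≤ m → m ≤ (k : Int) - 1 → P m = false) →
    (PySem.List.pyRange ((k : Int) - 1) (-1) (-1)).takeWhile P = PySem.List.pyRange ((k : Int) - 1) m (-1) := by
  intro k
  induction k with
  | zero =>
    intro m hm1 hm2 _ _
    rw [PySem.List.pyRange_neg_one_eq_nil (by omega), PySem.List.pyRange_neg_one_eq_nil (by omega)]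
    simp
  | succ k ih =>
    intro m hm1 hm2 htrue hfalse
    have hcons : PySem.List.pyRange (((k + 1 : Nat) : Int) - 1) (-1) (-1)
        = ((k : Nat) : Int) :: PySem.List.pyRange (((k : Nat) : Int) - 1) (-1) (-1) := by
      rw [show (((k + 1 : Nat) : Int) - 1) = ((k : Nat) : Int) by push_cast; ring]
      exact PySem.List.pyRange_neg_one_cons (by omega)
    rw [hcons]
    by_cases hm : m = (k : Int)
    · subst hm
      have hPm : P (k : Int) = false := hfalse (by omega) (by push_cast; omega)
      simp only [List.takeWhile, hPm]
      rw [PySem.List.pyRange_neg_one_eq_nil (by omega)]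
    · have hmk : m ≤ (k : Int) - 1 := by push_cast at hm2; omega
      have hPk : P (k : Int) = true := htrue (k : Int) (by omega) (by push_cast; omega)
      simp only [List.takeWhile, hPk]
      rw [ih m hm1 hmk (fun c h1 h2 => htrue c h1 (by omega)) (fun h1 h2 => hfalse h1 (by omega))]
      rw [show (((k + 1 : Nat) : Int) - 1) = ((k : Nat) : Int) by push_cast; omega]
      exact (PySem.List.pyRange_neg_one_cons (by omega : m < ((k : Nat) : Int))).symm

-- assembly helpers
theorem rmd_spec (s0 row : String) (h : (s0.toList.length : Int) ≤ (row.toList.length : Int)) :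
    rightmostNonDot row (s0.toList.length : Int) ≤ (s0.toList.length : Int) - 1 ∧
    -1 ≤ rightmostNonDot row (s0.toList.length : Int) ∧
    (0 ≤ rightmostNonDot row (s0.toList.length : Int) →
      row.toList.getD (rightmostNonDot row (s0.toList.length : Int)).toNat '.' ≠ '.') ∧
    (∀ j : Int, rightmostNonDot row (s0.toList.length : Int) < j → j ≤ (s0.toList.length : Int) - 1 →
      row.toList.getD j.toNat '.' = '.') := by
  have hrw : rightmostNonDot row (s0.toList.length : Int)
      = rmAux row.toList (PySem.List.pyRange ((s0.toList.length : Int) - 1) (-1) (-1)) := by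
    simp only [rightmostNonDot, PySem.Str.len_eq]
    rw [show min ((row.toList.length : Int)) ((s0.toList.length : Int)) = (s0.toList.length : Int) by omega]
  rw [hrw]
  exact rm_spec row.toList s0.toList.length (by exact_mod_cast h)

-- ===== VERDICT (by name: the statement is the Claim_ definition above) =====
theorem check_right_column_spec : Claim_equal_check_right_column := by
  intro tl _ hpre
  obtain ⟨hne, hrag⟩ := hpre
  obtain ⟨s0, rest, rfl⟩ : ∃ s0 rest, tl = s0 :: rest := by
    cases tl with
    | nil => exact absurd rfl hne
    | cons a b => exact ⟨a, b, rfl⟩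
  simp only [List.getD_cons_zero] at hrag
  unfold Spec_check_right_column
  have hget0 : PySem.List.pyGet? (s0 :: rest) 0 = some s0 := PySem.List.pyGet?_zero_cons s0 rest
  have hA : check_right_column (s0 :: rest)
      = goA (s0 :: rest) (PySem.List.pyRange ((s0.toList.length : Int) - 1) (-1) (-1)) [] := by
    simp only [check_right_column, hget0, PySem.Str.len_eq]
  have hB : check_right_column_alt (s0 :: rest)
      = PySem.List.pyRange ((s0.toList.length : Int) - 1)
          ((s0 :: rest).foldl (fun m row => max m (rightmostNonDot row (s0.toList.length : Int))) (-1)) (-1) := by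
    simp only [check_right_column_alt, hget0, PySem.Str.len_eq]
  have hinit : (-1 : Int) ≤ (s0 :: rest).foldl (fun m row => max m (rightmostNonDot row (s0.toList.length : Int))) (-1) :=
    (PySem.List.le_foldl_max_int (s0 :: rest) (fun row => rightmostNonDot row (s0.toList.length : Int)) (-1)).1
  have hle : ∀ x ∈ s0 :: rest, rightmostNonDot x (s0.toList.length : Int)
      ≤ (s0 :: rest).foldl (fun m row => max m (rightmostNonDot row (s0.toList.length : Int))) (-1) :=
    (PySem.List.le_foldl_max_int (s0 :: rest) (fun row => rightmostNonDot row (s0.toList.length : Int)) (-1)).2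
  rw [hA, hB, goA_eq_takeWhile, List.nil_append]
  by_cases hall : ∀ s ∈ s0 :: rest, (s0.toList.length : Int) ≤ (s.toList.length : Int)
  · -- every row is at least as long as the first: A's column scan never raises
    have hmem : (s0 :: rest).foldl (fun m row => max m (rightmostNonDot row (s0.toList.length : Int))) (-1) = -1
        ∨ (s0 :: rest).foldl (fun m row => max m (rightmostNonDot row (s0.toList.length : Int))) (-1)
          ∈ (s0 :: rest).map (fun row => rightmostNonDot row (s0.toList.length : Int)) := by
      rw [show (s0 :: rest).foldl (fun m row => max m (rightmostNonDot row (s0.toList.length : Int))) (-1)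
          = ((s0 :: rest).map (fun row => rightmostNonDot row (s0.toList.length : Int))).foldl max (-1) from
          by rw [List.foldl_map]]
      exact PySem.List.foldl_max_mem _ _
    have hub : (s0 :: rest).foldl (fun m row => max m (rightmostNonDot row (s0.toList.length : Int))) (-1)
        ≤ (s0.toList.length : Int) - 1 := by
      rcases hmem with h | h
      · rw [h]; omega
      · obtain ⟨row, hrow, heq⟩ := List.mem_map.mp h
        have := (rmd_spec s0 row (hall row hrow)).1
        omega
    have htrue : ∀ c : Int,
        (s0 :: rest).foldl (fun m row => max m (rightmostNonDot row (s0.toList.length : Int))) (-1) < c →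
        c ≤ (s0.toList.length : Int) - 1 → check_column_A (s0 :: rest) c = true := by
      intro c h1 h2
      rw [checkCol_iff (s0 :: rest) c (by omega) (fun s hs => by have := hall s hs; omega)]
      intro s hs
      exact (rmd_spec s0 s (hall s hs)).2.2.2 c (by have := hle s hs; omega) h2
    have hfalse : 0 ≤ (s0 :: rest).foldl (fun m row => max m (rightmostNonDot row (s0.toList.length : Int))) (-1) →
        (s0 :: rest).foldl (fun m row => max m (rightmostNonDot row (s0.toList.length : Int))) (-1)
          ≤ (s0.toList.length : Int) - 1 →
        check_column_A (s0 :: rest)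
          ((s0 :: rest).foldl (fun m row => max m (rightmostNonDot row (s0.toList.length : Int))) (-1)) = false := by
      intro h1 h2
      rcases hmem with h | h
      · omega
      · obtain ⟨row, hrow, heq⟩ := List.mem_map.mp h
        rw [Bool.eq_false_iff]
        intro htrue'
        rw [checkCol_iff (s0 :: rest) _ (by omega) (fun s hs => by have := hall s hs; omega)] at htrue'
        have h3 := (rmd_spec s0 row (hall row hrow)).2.2.1
        rw [heq] at h3
        exact h3 h1 (htrue' row hrow)
    exact takeWhile_countdown (check_column_A (s0 :: rest)) s0.toList.length _ hinit hub htrue hfalse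
  · -- some row is shorter than the first: Pre_ provides an earlier long row with a non-dot in the
    -- last column, so both sides return []
    push Not at hall
    obtain ⟨srow, hsrow, hshort⟩ := hall
    obtain ⟨r, hr, hrEq⟩ := List.mem_iff_getElem.mp hsrow
    have hExists : ∃ i, i < (s0 :: rest).length ∧
        (((s0 :: rest).getD i "").toList.length : Int) < (s0.toList.length : Int) :=
      ⟨r, hr, by rw [List.getD_eq_getElem _ _ hr, hrEq]; omega⟩
    obtain ⟨hr0lt, hr0short⟩ := Nat.find_spec hExists
    have hlongpre : ∀ j < Nat.find hExists, (s0.toList.length : Int) ≤ (((s0 :: rest).getD j "").toList.length : Int) := by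
      intro j hj
      by_contra hcon
      exact Nat.find_min hExists hj ⟨by omega, by omega⟩
    obtain ⟨r', hr'lt, hlongr', hnd⟩ := hrag (Nat.find hExists) hr0lt hr0short
    have hn1 : 1 ≤ s0.toList.length := by omega
    have htoNat : ((s0.toList.length : Int) - 1).toNat = s0.toList.length - 1 := by omega
    have hr'len : r' < (s0 :: rest).length := by omega
    have hgetr' : (s0 :: rest).getD r' "" = (s0 :: rest)[r'] := List.getD_eq_getElem _ _ hr'len
    have hndE : (s0 :: rest)[r'].toList.getD ((s0.toList.length : Int) - 1).toNat '.' ≠ '.' := by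
      rw [htoNat, ← hgetr']; exact hnd
    have hP : check_column_A (s0 :: rest) ((s0.toList.length : Int) - 1) = false := by
      refine checkCol_false (s0 :: rest) _ (by omega) r' hr'len ?_ hndE ?_
      · rw [← hgetr']; omega
      · intro j hj
        have := hlongpre j (by omega)
        rw [List.getD_eq_getElem _ _ (by omega : j < (s0 :: rest).length)] at this
        omega
    have hfr' : rightmostNonDot ((s0 :: rest)[r']) (s0.toList.length : Int) = (s0.toList.length : Int) - 1 := by
      have hlen : ((s0.toList.length : Int) - 1) < (((s0 :: rest)[r']).toList.length : Int) := by
        rw [← hgetr']; omega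
      have hgetc : PySem.List.pyGet? ((s0 :: rest)[r']).toList ((s0.toList.length : Int) - 1)
          = some (((s0 :: rest)[r']).toList[((s0.toList.length : Int) - 1).toNat]'(by omega)) :=
        PySem.List.pyGet?_eq_some_getElem _ (by omega) hlen
      have hndG : ((s0 :: rest)[r']).toList[((s0.toList.length : Int) - 1).toNat]'(by omega) ≠ '.' := by
        rw [← List.getD_eq_getElem _ '.' (by omega : ((s0.toList.length : Int) - 1).toNat < ((s0 :: rest)[r']).toList.length)]
        exact hndE
      simp only [rightmostNonDot, PySem.Str.len_eq]
      rw [show min ((((s0 :: rest)[r']).toList.length : Int)) ((s0.toList.length : Int)) = (s0.toList.length : Int) by omega]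
      rw [PySem.List.pyRange_neg_one_cons (by omega : (-1 : Int) < (s0.toList.length : Int) - 1)]
      simp only [rmAux, hgetc]
      rw [if_pos hndG]
    have hmge : (s0.toList.length : Int) - 1
        ≤ (s0 :: rest).foldl (fun m row => max m (rightmostNonDot row (s0.toList.length : Int))) (-1) := by
      have := hle ((s0 :: rest)[r']) (List.getElem_mem hr'len)
      omega
    rw [PySem.List.pyRange_neg_one_cons (by omega : (-1 : Int) < (s0.toList.length : Int) - 1)]
    rw [List.takeWhile_cons, hP]
    rw [PySem.List.pyRange_neg_one_eq_nil hmge]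
    simp
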